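-- pv_equiv track=rewrite | github.com/losa201/Xorb | src/api/app/services/enhanced_threat_intelligence.py | _is_service_impersonation
-- ===== SOURCE A (Python) =====
-- def _is_service_impersonation(domain: str) -> bool:
--     """Detect service impersonation attempts"""
--     legitimate_services = [
--         "google", "microsoft", "amazon", "apple", "facebook", "twitter",
--         "paypal", "ebay", "netflix", "dropbox", "github", "linkedin"
--     ]
--
--     domain_lower = domain.lower()
--
--     # Check for common impersonation patterns
--     for service in legitimate_services:
--         if service in domain_lower:
--             # Check for suspicious variations
--             if any(pattern in domain_lower for pattern in [
--                 f"{service}-", f"{service}_", f"secure{service}",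
--                 f"{service}secure", f"my{service}", f"{service}login"
--             ]):
--                 return True
--
--     return False
-- ===== SOURCE B (Python) =====
-- _SERVICES = [
--     "google", "microsoft", "amazon", "apple", "facebook", "twitter",
--     "paypal", "ebay", "netflix", "dropbox", "github", "linkedin"
-- ]
--
--
-- def _is_service_impersonation(domain: str) -> bool:
--     """Detect service impersonation attempts"""
--     # Positional scan: instead of searching for composed patterns, walk over
--     # every position of the lowered domain, and wherever a service name
--     # occurs, inspect its immediate context (what precedes / follows it).
--     dl = domain.lower()
--     n = len(dl)
--     for i in range(n):
--         for s in _SERVICES: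
--             j = i + len(s)
--             if dl[i:j] != s:
--                 continue
--             if j < n and dl[j] in "-_":
--                 return True
--             if dl[j:j + 6] == "secure" or dl[j:j + 5] == "login":
--                 return True
--             if i >= 6 and dl[i - 6:i] == "secure":
--                 return True
--             if i >= 2 and dl[i - 2:i] == "my":
--                 return True
--     return False
-- ===== Notes on version B (the rewrite author's own statement) =====
-- stated objective: alternative
-- what changed: Instead of A's substring searches for 72 composed patterns under a per-service membership guard, B does one positional scan of the lowered domain and, wherever a service name occurs, inspects the surrounding context (a following '-'/'_', a following 'secure'/'login', a preceding 'secure'/'my'); no pattern strings are ever built.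
import Mathlib
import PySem

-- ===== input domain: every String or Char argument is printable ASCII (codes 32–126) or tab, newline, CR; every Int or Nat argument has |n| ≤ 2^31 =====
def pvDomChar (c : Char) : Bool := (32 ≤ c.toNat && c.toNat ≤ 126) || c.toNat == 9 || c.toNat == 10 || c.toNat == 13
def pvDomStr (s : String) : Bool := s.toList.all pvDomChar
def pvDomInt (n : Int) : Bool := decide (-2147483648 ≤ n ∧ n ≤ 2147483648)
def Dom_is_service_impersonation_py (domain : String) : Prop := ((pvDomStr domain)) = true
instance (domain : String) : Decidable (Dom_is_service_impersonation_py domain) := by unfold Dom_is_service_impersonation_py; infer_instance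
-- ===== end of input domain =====

-- B replaces A's composed-pattern substring searches by a single positional scan that
-- inspects the context around each occurrence of a service name (simpler decomposition).

-- ===== PORT A =====
-- A's service list
def pvServicesA : List String :=
  ["google", "microsoft", "amazon", "apple", "facebook", "twitter",
   "paypal", "ebay", "netflix", "dropbox", "github", "linkedin"]

-- A's per-service suspicious variations (the f-string list in the inner any)
def pvVariationsA (service : String) : List String :=
  [service ++ "-", service ++ "_", "secure" ++ service,
   service ++ "secure", "my" ++ service, service ++ "login"]

-- the for-loop with early 'return True' = any over the services
def is_service_impersonation_py (domain : String) : Bool :=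
  let domain_lower := PySem.Str.lower domain
  pvServicesA.any (fun service =>
    PySem.Str.isIn service domain_lower &&
    (pvVariationsA service).any (fun pattern => PySem.Str.isIn pattern domain_lower))

-- ===== PORT B =====
def pvServicesB : List String :=
  ["google", "microsoft", "amazon", "apple", "facebook", "twitter",
   "paypal", "ebay", "netflix", "dropbox", "github", "linkedin"]

-- Python slice dl[a:b]; exact for the natural bounds 0 ≤ a ≤ b used by Source B
def pvSl (l : List Char) (a b : Nat) : List Char := (l.take b).drop a

-- Source B's inner-loop body for position i and service s (the sequence of
-- guarded 'return True's, as a disjunction; 'continue' = the leading test)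
def pvCheck (l : List Char) (i : Nat) (s : List Char) : Bool :=
  let j := i + s.length
  pvSl l i j == s &&
    ((match l.drop j with        -- j < n and dl[j] in "-_"
      | c :: _ => c == '-' || c == '_'
      | [] => false)
     || pvSl l j (j + 6) == "secure".toList
     || pvSl l j (j + 5) == "login".toList
     || (decide (6 ≤ i) && pvSl l (i - 6) i == "secure".toList)
     || (decide (2 ≤ i) && pvSl l (i - 2) i == "my".toList))

-- the two nested for-loops over range(n) × services with early return = nested any
def is_service_impersonation_py_alt (domain : String) : Bool :=
  let l := (PySem.Str.lower domain).toList
  (List.range l.length).any (fun i => pvServicesB.any (fun s => pvCheck l i s.toList))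

-- ===== PRECONDITION & SPEC =====
def Spec_is_service_impersonation_py (domain : String) (out : Bool) : Prop := out = is_service_impersonation_py_alt domain
instance (domain : String) (out : Bool) : Decidable (Spec_is_service_impersonation_py domain out) := by unfold Spec_is_service_impersonation_py; infer_instance

-- ===== CLAIM (what is proved, stated in full; the proofs are below) =====
def Claim_equal_is_service_impersonation_py : Prop := ∀ (domain : String), Dom_is_service_impersonation_py domain → Spec_is_service_impersonation_py domain (is_service_impersonation_py domain)

-- ===== LEMMAS AND PROOFS =====

-- A's outer guard is absorbed: every suspicious pattern contains its service name.
theorem pv_guard_absorb (svc dl : String) (ps : List String)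
    (h : ∀ p ∈ ps, svc.toList <:+: p.toList) :
    (PySem.Str.isIn svc dl && ps.any (fun p => PySem.Str.isIn p dl))
      = ps.any (fun p => PySem.Str.isIn p dl) := by
  cases hps : ps.any (fun p => PySem.Str.isIn p dl) with
  | false => simp
  | true =>
    rw [Bool.and_true]
    rw [List.any_eq_true] at hps
    obtain ⟨p, hp, hin⟩ := hps
    rw [PySem.Str.isIn_iff_infix] at hin ⊢
    exact (h p hp).trans hin

theorem pv_per_service (svc dl : String) :
    (PySem.Str.isIn svc dl && (pvVariationsA svc).any (fun p => PySem.Str.isIn p dl))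
      = (pvVariationsA svc).any (fun p => PySem.Str.isIn p dl) := by
  apply pv_guard_absorb
  intro p hp
  simp only [pvVariationsA, List.mem_cons, List.not_mem_nil, or_false] at hp
  rcases hp with h | h | h | h | h | h <;> subst h <;>
    simp only [String.toList_append] <;>
    first
      | exact (List.prefix_append _ _).isInfix
      | exact (List.suffix_append _ _).isInfix

-- slice of fixed width = prefix of the drop
theorem pv_sl_eq_iff (l t : List Char) (a : Nat) :
    pvSl l a (a + t.length) = t ↔ t <+: l.drop a := by
  unfold pvSl
  rw [List.drop_take]
  have hk : a + t.length - a = t.length := by omega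
  rw [hk]
  constructor
  · intro h
    exact h ▸ List.take_prefix _ _
  · intro h
    exact (List.prefix_iff_eq_take.mp h).symm

-- nonempty prefix of a drop forces the position to be inside the list
theorem pv_pos_lt (l t : List Char) (a : Nat) (ht : t ≠ []) (h : t <+: l.drop a) :
    a < l.length := by
  by_contra hlt
  have hle : l.length ≤ a := by omega
  rw [List.drop_eq_nil_of_le hle] at h
  exact ht (List.prefix_nil.mp h)

-- infix of l ↔ prefix of some drop, with an in-range position for nonempty patterns
theorem pv_infix_iff (t l : List Char) (ht : t ≠ []) :
    t <:+: l ↔ ∃ a, a < l.length ∧ t <+: l.drop a := by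
  constructor
  · rintro ⟨u, v, rfl⟩
    refine ⟨u.length, ?_, ?_⟩
    · have : t.length ≠ 0 := by simpa using ht
      simp [List.length_append]; omega
    · simp
  · rintro ⟨a, _, h⟩
    exact h.isInfix.trans (List.drop_suffix a l).isInfix

-- append splits across a prefix test
theorem pv_prefix_append_iff (x y m : List Char) :
    (x ++ y) <+: m ↔ x <+: m ∧ y <+: m.drop x.length := by
  constructor
  · rintro ⟨r, hr⟩
    subst hr
    refine ⟨⟨y ++ r, by simp⟩, ?_⟩
    rw [List.append_assoc, List.drop_left]
    exact ⟨r, rfl⟩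
  · rintro ⟨hx, hy⟩
    obtain ⟨r0, rfl⟩ := hx
    rw [List.drop_left] at hy
    obtain ⟨r, rfl⟩ := hy
    exact ⟨r, by simp⟩

-- the head-membership clause of Source B ↔ two singleton prefixes
theorem pv_head_clause (l : List Char) (j : Nat) :
    (match l.drop j with
     | c :: _ => c == '-' || c == '_'
     | [] => false) = true ↔ (['-'] <+: l.drop j ∨ ['_'] <+: l.drop j) := by
  generalize l.drop j = d
  cases d with
  | nil => simp
  | cons c cs =>
    simp only [Bool.or_eq_true, beq_iff_eq, List.cons_prefix_cons, List.nil_prefix, and_true]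
    constructor
    · rintro (h | h) <;> [exact Or.inl h.symm; exact Or.inr h.symm]
    · rintro (h | h) <;> [exact Or.inl h.symm; exact Or.inr h.symm]

-- pvCheck unfolded to prefix conditions
theorem pv_check_iff (l t : List Char) (i : Nat) :
    pvCheck l i t = true ↔
      t <+: l.drop i ∧
        ((['-'] <+: l.drop (i + t.length) ∨ ['_'] <+: l.drop (i + t.length))
         ∨ "secure".toList <+: l.drop (i + t.length)
         ∨ "login".toList <+: l.drop (i + t.length)
         ∨ (6 ≤ i ∧ "secure".toList <+: l.drop (i - 6))
         ∨ (2 ≤ i ∧ "my".toList <+: l.drop (i - 2))) := by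
  unfold pvCheck
  simp only [Bool.and_eq_true, Bool.or_eq_true, beq_iff_eq, decide_eq_true_eq]
  constructor
  · rintro ⟨h0, hrest⟩
    refine ⟨(pv_sl_eq_iff l t i).mp h0, ?_⟩
    rcases hrest with (((h | h) | h) | h) | h
    · exact Or.inl ((pv_head_clause l (i + t.length)).mp h)
    · refine Or.inr (Or.inl ?_)
      have : pvSl l (i + t.length) ((i + t.length) + ("secure".toList).length) = "secure".toList := by
        simpa using h
      exact (pv_sl_eq_iff l _ _).mp this
    · refine Or.inr (Or.inr (Or.inl ?_))
      have : pvSl l (i + t.length) ((i + t.length) + ("login".toList).length) = "login".toList := by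
        simpa using h
      exact (pv_sl_eq_iff l _ _).mp this
    · refine Or.inr (Or.inr (Or.inr (Or.inl ⟨h.1, ?_⟩)))
      have h6 := h.1
      have : pvSl l (i - 6) ((i - 6) + ("secure".toList).length) = "secure".toList := by
        have : (i - 6) + ("secure".toList).length = i := by simp; omega
        rw [this]; exact h.2
      exact (pv_sl_eq_iff l _ _).mp this
    · refine Or.inr (Or.inr (Or.inr (Or.inr ⟨h.1, ?_⟩)))
      have : pvSl l (i - 2) ((i - 2) + ("my".toList).length) = "my".toList := by
        have : (i - 2) + ("my".toList).length = i := by simp; omega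
        rw [this]; exact h.2
      exact (pv_sl_eq_iff l _ _).mp this
  · rintro ⟨h0, hrest⟩
    refine ⟨(pv_sl_eq_iff l t i).mpr h0, ?_⟩
    rcases hrest with h | h | h | ⟨h6, h⟩ | ⟨h2, h⟩
    · exact Or.inl (Or.inl (Or.inl (Or.inl ((pv_head_clause l (i + t.length)).mpr h))))
    · refine Or.inl (Or.inl (Or.inl (Or.inr ?_)))
      have := (pv_sl_eq_iff l "secure".toList (i + t.length)).mpr h
      simpa using this
    · refine Or.inl (Or.inl (Or.inr ?_))
      have := (pv_sl_eq_iff l "login".toList (i + t.length)).mpr h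
      simpa using this
    · refine Or.inl (Or.inr ⟨h6, ?_⟩)
      have := (pv_sl_eq_iff l "secure".toList (i - 6)).mpr h
      have heq : (i - 6) + ("secure".toList).length = i := by simp; omega
      rw [heq] at this
      exact this
    · refine Or.inr ⟨h2, ?_⟩
      have := (pv_sl_eq_iff l "my".toList (i - 2)).mpr h
      have heq : (i - 2) + ("my".toList).length = i := by simp; omega
      rw [heq] at this
      exact this

-- per-service equivalence: one of the six patterns occurs ↔ some in-range
-- position carries the service with suspicious context
theorem pv_main (t l : List Char) (ht : t ≠ []) :
    ((t ++ ['-']) <:+: l ∨ (t ++ ['_']) <:+: l ∨ ("secure".toList ++ t) <:+: l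
      ∨ (t ++ "secure".toList) <:+: l ∨ ("my".toList ++ t) <:+: l
      ∨ (t ++ "login".toList) <:+: l)
    ↔ ∃ i, i < l.length ∧ pvCheck l i t = true := by
  have hne1 : ∀ (c : Char), t ++ [c] ≠ [] := by intro c; simp
  constructor
  · rintro (h | h | h | h | h | h)
    · obtain ⟨a, ha, hp⟩ := (pv_infix_iff _ l (hne1 '-')).mp h
      obtain ⟨h1, h2⟩ := (pv_prefix_append_iff t ['-'] _).mp hp
      rw [List.drop_drop] at h2
      exact ⟨a, ha, (pv_check_iff l t a).mpr ⟨h1, Or.inl (Or.inl (by simpa [Nat.add_comm] using h2))⟩⟩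
    · obtain ⟨a, ha, hp⟩ := (pv_infix_iff _ l (hne1 '_')).mp h
      obtain ⟨h1, h2⟩ := (pv_prefix_append_iff t ['_'] _).mp hp
      rw [List.drop_drop] at h2
      exact ⟨a, ha, (pv_check_iff l t a).mpr ⟨h1, Or.inl (Or.inr (by simpa [Nat.add_comm] using h2))⟩⟩
    · obtain ⟨a, ha, hp⟩ := (pv_infix_iff _ l (by simp)).mp h
      obtain ⟨h1, h2⟩ := (pv_prefix_append_iff "secure".toList t _).mp hp
      rw [List.drop_drop] at h2
      refine ⟨a + 6, pv_pos_lt l t (a + 6) ht (by simpa using h2), ?_⟩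
      refine (pv_check_iff l t (a + 6)).mpr ⟨by simpa using h2, ?_⟩
      refine Or.inr (Or.inr (Or.inr (Or.inl ⟨by omega, ?_⟩)))
      simpa using h1
    · obtain ⟨a, ha, hp⟩ := (pv_infix_iff _ l (by simp)).mp h
      obtain ⟨h1, h2⟩ := (pv_prefix_append_iff t "secure".toList _).mp hp
      rw [List.drop_drop] at h2
      exact ⟨a, ha, (pv_check_iff l t a).mpr ⟨h1, Or.inr (Or.inl (by simpa [Nat.add_comm] using h2))⟩⟩
    · obtain ⟨a, ha, hp⟩ := (pv_infix_iff _ l (by simp)).mp h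
      obtain ⟨h1, h2⟩ := (pv_prefix_append_iff "my".toList t _).mp hp
      rw [List.drop_drop] at h2
      refine ⟨a + 2, pv_pos_lt l t (a + 2) ht (by simpa using h2), ?_⟩
      refine (pv_check_iff l t (a + 2)).mpr ⟨by simpa using h2, ?_⟩
      refine Or.inr (Or.inr (Or.inr (Or.inr ⟨by omega, ?_⟩)))
      simpa using h1
    · obtain ⟨a, ha, hp⟩ := (pv_infix_iff _ l (by simp)).mp h
      obtain ⟨h1, h2⟩ := (pv_prefix_append_iff t "login".toList _).mp hp
      rw [List.drop_drop] at h2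
      exact ⟨a, ha, (pv_check_iff l t a).mpr ⟨h1, Or.inr (Or.inr (Or.inl (by simpa [Nat.add_comm] using h2)))⟩⟩
  · rintro ⟨i, hi, hc⟩
    obtain ⟨h1, hrest⟩ := (pv_check_iff l t i).mp hc
    rcases hrest with (h | h) | h | h | ⟨h6, h⟩ | ⟨h2, h⟩
    · refine Or.inl ((pv_infix_iff _ l (hne1 '-')).mpr ⟨i, hi, ?_⟩)
      exact (pv_prefix_append_iff t ['-'] _).mpr ⟨h1, by rw [List.drop_drop]; simpa [Nat.add_comm] using h⟩
    · refine Or.inr (Or.inl ((pv_infix_iff _ l (hne1 '_')).mpr ⟨i, hi, ?_⟩))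
      exact (pv_prefix_append_iff t ['_'] _).mpr ⟨h1, by rw [List.drop_drop]; simpa [Nat.add_comm] using h⟩
    · refine Or.inr (Or.inr (Or.inr (Or.inl ((pv_infix_iff _ l (by simp)).mpr ⟨i, hi, ?_⟩))))
      exact (pv_prefix_append_iff t "secure".toList _).mpr
        ⟨h1, by rw [List.drop_drop]; simpa [Nat.add_comm] using h⟩
    · refine Or.inr (Or.inr (Or.inr (Or.inr (Or.inr
        ((pv_infix_iff _ l (by simp)).mpr ⟨i, hi, ?_⟩)))))
      exact (pv_prefix_append_iff t "login".toList _).mpr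
        ⟨h1, by rw [List.drop_drop]; simpa [Nat.add_comm] using h⟩
    · refine Or.inr (Or.inr (Or.inl ((pv_infix_iff _ l (by simp)).mpr ⟨i - 6, ?_, ?_⟩)))
      · omega
      · refine (pv_prefix_append_iff "secure".toList t _).mpr ⟨by simpa using h, ?_⟩
        rw [List.drop_drop]
        have : (i - 6) + ("secure".toList).length = i := by simp; omega
        rw [this]; exact h1
    · refine Or.inr (Or.inr (Or.inr (Or.inr (Or.inl
        ((pv_infix_iff _ l (by simp)).mpr ⟨i - 2, ?_, ?_⟩))))
      )
      · omega
      · refine (pv_prefix_append_iff "my".toList t _).mpr ⟨by simpa using h, ?_⟩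
        rw [List.drop_drop]
        have : (i - 2) + ("my".toList).length = i := by simp; omega
        rw [this]; exact h1

-- each pattern list is the six-fold disjunction of pv_main
theorem pv_services_ne : ∀ s ∈ pvServicesA, s.toList ≠ [] := by decide

theorem pv_variations_iff (s : String) (l : List Char) (ht : s.toList ≠ []) :
    (∃ p ∈ pvVariationsA s, p.toList <:+: l) ↔ ∃ i, i < l.length ∧ pvCheck l i s.toList = true := by
  rw [← pv_main s.toList l ht]
  simp only [pvVariationsA, List.mem_cons, List.not_mem_nil, or_false,
    exists_eq_or_imp, exists_eq_left, String.toList_append]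
  have h1 : ("-" : String).toList = ['-'] := rfl
  have h2 : ("_" : String).toList = ['_'] := rfl
  rw [h1, h2]

-- ===== VERDICT (by name: the statement is the Claim_ definition above) =====
theorem is_service_impersonation_py_spec : Claim_equal_is_service_impersonation_py := by
  intro domain _
  unfold Spec_is_service_impersonation_py is_service_impersonation_py is_service_impersonation_py_alt
  simp only [pv_per_service]
  rw [Bool.eq_iff_iff]
  simp only [List.any_eq_true, List.mem_range, PySem.Str.isIn_iff_infix]
  constructor
  · rintro ⟨s, hs, p, hp, hinf⟩
    obtain ⟨i, hi, hc⟩ := (pv_variations_iff s _ (pv_services_ne s hs)).mp ⟨p, hp, hinf⟩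
    exact ⟨i, hi, s, (show pvServicesB = pvServicesA from rfl) ▸ hs, hc⟩
  · rintro ⟨i, hi, s, hs, hc⟩
    have hs' : s ∈ pvServicesA := (show pvServicesB = pvServicesA from rfl) ▸ hs
    obtain ⟨p, hp, hinf⟩ := (pv_variations_iff s _ (pv_services_ne s hs')).mpr ⟨i, hi, hc⟩
    exact ⟨s, hs', p, hp, hinf⟩
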